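-- pv_equiv track=rewrite | github.com/qualiaMachine/RunAI_apps | rag_app/vendor/KohakuRAG/workflows/sweeps/ensemble_vs_ref_vote.py | aggregate_ref_priority
-- ===== SOURCE A (Python) =====
-- from collections import Counter
--
-- def majority_vote(values: list[str]) -> str:
--     """Return most common value (first occurrence breaks ties)."""
--     if not values:
--         return "is_blank"
--
--     counter = Counter(values)
--     max_count = counter.most_common(1)[0][1]
--     tied = [v for v, c in counter.items() if c == max_count]
--
--     if len(tied) == 1:
--         return tied[0]
--
--     # First occurrence tiebreak
--     for v in values:
--         if v in tied:
--             return v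
--     return tied[0]
--
-- def aggregate_ref_priority(rows: list[dict[str, str]]) -> tuple[str, str]:
--     """First vote on ref_id, then vote answer_value among rows with winning ref."""
--     if not rows:
--         return "is_blank", "is_blank"
--
--     # Vote on ref_id
--     ref_ids = [r.get("ref_id", "is_blank") or "is_blank" for r in rows]
--     best_ref = majority_vote(ref_ids)
--
--     # Filter to rows with winning ref
--     matching_rows = [
--         r for r in rows if (r.get("ref_id", "is_blank") or "is_blank") == best_ref
--     ]
--
--     # Vote on answer_value among matching rows
--     answer_values = [
--         r.get("answer_value", "is_blank") or "is_blank" for r in matching_rows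
--     ]
--     best_val = majority_vote(answer_values)
--
--     return best_val, best_ref
-- ===== SOURCE B (Python) =====
-- def _norm(r, key):
--     return r.get(key, "is_blank") or "is_blank"
--
-- def _vote(values):
--     # Brute-force argmax: no counter structure at all; values.count(v) is
--     # recomputed per element, and strict-greater over the raw list picks the
--     # first occurrence of a maximal-count value (same tiebreak as A).
--     best, best_count = "is_blank", 0
--     for v in values:
--         c = values.count(v)
--         if c > best_count:
--             best, best_count = v, c
--     return best
--
-- def aggregate_ref_priority(rows):
--     best_ref = _vote([_norm(r, "ref_id") for r in rows])
--     best_val = _vote([_norm(r, "answer_value")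
--                       for r in rows if _norm(r, "ref_id") == best_ref])
--     return best_val, best_ref
-- ===== Notes on version B (the rewrite author's own statement) =====
-- stated objective: alternative
-- what changed: majority_vote's Counter/most_common/tied-list/rescan machinery is replaced by a counter-free brute-force argmax: scan the raw values list, recomputing values.count(v) per element and keeping the current value only on a strictly greater count, which yields the first occurrence of a maximal-count value; the empty-rows guard and matching_rows list are also dropped.
import Mathlib
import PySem

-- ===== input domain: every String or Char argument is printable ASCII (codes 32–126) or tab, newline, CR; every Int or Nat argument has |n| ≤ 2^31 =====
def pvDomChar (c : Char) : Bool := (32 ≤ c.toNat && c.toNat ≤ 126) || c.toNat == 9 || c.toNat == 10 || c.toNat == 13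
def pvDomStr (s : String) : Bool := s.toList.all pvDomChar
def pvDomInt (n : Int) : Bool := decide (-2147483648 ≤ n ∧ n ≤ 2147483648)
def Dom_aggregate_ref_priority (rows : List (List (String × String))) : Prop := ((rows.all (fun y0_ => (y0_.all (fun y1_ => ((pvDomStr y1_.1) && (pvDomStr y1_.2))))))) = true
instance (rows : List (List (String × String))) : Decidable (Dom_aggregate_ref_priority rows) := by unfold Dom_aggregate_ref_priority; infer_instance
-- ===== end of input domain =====

-- B replaces majority_vote's Counter/most_common/tied-list/rescan by a counter-free
-- brute-force argmax (values.count recomputed per element, strict-greater keeps the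
-- first occurrence of a maximal-count value). Objective: alternative.

-- ===== PORT A =====
-- r.get(key, "is_blank") or "is_blank"   (empty string is the only falsy value here)
def pyRowGet (r : List (String × String)) (key : String) : String :=
  let v := PySem.Dict.getD (PySem.Dict.mk r) key "is_blank"
  if v = "" then "is_blank" else v

def majority_vote (values : List String) : String :=
  if values = [] then "is_blank"
  else
    let counter := PySem.Dict.counter values
    let max_count := ((PySem.List.sorted counter.items (fun kv => kv.2) true).headD ("", 0)).2
    let tied := (counter.items.filter (fun kv => kv.2 == max_count)).map (fun kv => kv.1)
    if tied.length = 1 then tied.headD ""   -- tied[0]; tied is provably nonempty here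
    else
      match values.find? (fun v => tied.contains v) with
      | some v => v
      | none => tied.headD ""               -- tied[0]

def aggregate_ref_priority (rows : List (List (String × String))) : String × String :=
  if rows = [] then ("is_blank", "is_blank")
  else
    let ref_ids := rows.map (fun r => pyRowGet r "ref_id")
    let best_ref := majority_vote ref_ids
    let matching_rows := rows.filter (fun r => pyRowGet r "ref_id" == best_ref)
    let answer_values := matching_rows.map (fun r => pyRowGet r "answer_value")
    (majority_vote answer_values, best_ref)

-- ===== PORT B =====
-- v if v else "is_blank"  (r.get(key, "is_blank") or "is_blank")
def rowField (r : List (String × String)) (key : String) : String :=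
  let v := PySem.Dict.getD (PySem.Dict.mk r) key "is_blank"
  if v ≠ "" then v else "is_blank"

-- brute-force argmax over the raw values list: c = values.count(v), keep on strictly greater
def voteBrute (values : List String) : String :=
  (values.foldl
    (fun (b : String × Int) v =>
      let c : Int := (PySem.List.count values v : Int)
      if c > b.2 then (v, c) else b)
    ("is_blank", 0)).1

def aggregate_ref_priority_alt (rows : List (List (String × String))) : String × String :=
  let best_ref := voteBrute (rows.map (fun r => rowField r "ref_id"))
  let best_val := voteBrute
    ((rows.filter (fun r => rowField r "ref_id" == best_ref)).map
      (fun r => rowField r "answer_value"))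
  (best_val, best_ref)

-- ===== PRECONDITION & SPEC =====
def Spec_aggregate_ref_priority (rows : List (List (String × String))) (out : String × String) : Prop := out = aggregate_ref_priority_alt rows
instance (rows : List (List (String × String))) (out : String × String) : Decidable (Spec_aggregate_ref_priority rows out) := by unfold Spec_aggregate_ref_priority; infer_instance

-- ===== CLAIM (what is proved, stated in full; the proofs are below) =====
def Claim_equal_aggregate_ref_priority : Prop := ∀ (rows : List (List (String × String))), Dom_aggregate_ref_priority rows → Spec_aggregate_ref_priority rows (aggregate_ref_priority rows)

-- ===== LEMMAS AND PROOFS =====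

theorem find?_congr_mem {α : Type} {p q : α → Bool} : ∀ (l : List α), (∀ x ∈ l, p x = q x) → l.find? p = l.find? q := by
  intro l h
  induction l with
  | nil => rfl
  | cons x t ih =>
    have hx := h x (by simp)
    simp only [List.find?_cons, hx]
    cases q x
    · exact ih (fun y hy => h y (by simp [hy]))
    · rfl

theorem set_add_of_mem {s : List String} {v : String} (h : v ∈ s) : PySem.Set.add s v = s := by
  simp [PySem.Set.add, PySem.Set.contains, h]

theorem set_add_of_not_mem {s : List String} {v : String} (h : v ∉ s) : PySem.Set.add s v = s ++ [v] := by
  simp [PySem.Set.add, PySem.Set.contains, h]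

theorem foldl_add_prefix : ∀ (l s : List String), ∃ t, l.foldl PySem.Set.add s = s ++ t := by
  intro l
  induction l with
  | nil => intro s; exact ⟨[], by simp⟩
  | cons v l ih =>
    intro s
    simp only [List.foldl_cons]
    obtain ⟨t, ht⟩ := ih (PySem.Set.add s v)
    by_cases hc : v ∈ s
    · refine ⟨t, ?_⟩
      rw [set_add_of_mem hc] at ht ⊢
      exact ht
    · exact ⟨v :: t, by rw [ht, set_add_of_not_mem hc]; simp⟩

theorem find?_foldl_add {q : String → Bool} : ∀ (l s : List String), (∀ x ∈ s, q x = false) → List.find? q (l.foldl PySem.Set.add s) = List.find? q l := by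
  intro l
  induction l with
  | nil =>
    intro s hs
    exact (List.find?_eq_none.mpr (fun x hx => by simp [hs x hx])).trans rfl
  | cons v l ih =>
    intro s hs
    simp only [List.foldl_cons]
    by_cases hq : q v = true
    · have hvs : v ∉ s := fun hv => by simp [hs v hv] at hq
      rw [set_add_of_not_mem hvs]
      obtain ⟨t, ht⟩ := foldl_add_prefix l (s ++ [v])
      rw [ht, List.append_assoc, List.find?_append,
        List.find?_eq_none.mpr (fun x hx => by simp [hs x hx])]
      simp [hq]
    · have hq' : q v = false := by simpa using hq
      by_cases hvs : v ∈ s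
      · rw [set_add_of_mem hvs, ih s hs]
        simp [hq']
      · rw [set_add_of_not_mem hvs, ih (s ++ [v]) (by
          intro x hx
          rcases List.mem_append.mp hx with h | h
          · exact hs x h
          · simp at h; subst h; exact hq')]
        simp [hq']

theorem find?_dedup {q : String → Bool} (l : List String) : List.find? q (PySem.List.dedup l) = List.find? q l := by
  rw [PySem.List.dedup_eq_ofList, PySem.Set.ofList_eq_foldl]
  exact find?_foldl_add l [] (by simp)

theorem foldl_max_attained (c : String → Int) : ∀ (ks : List String) (a : Int),
    ks.foldl (fun a v => max a (c v)) a = a ∨ ∃ v ∈ ks, ks.foldl (fun a v => max a (c v)) a = c v := by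
  intro ks
  induction ks with
  | nil => intro a; exact Or.inl rfl
  | cons k ks ih =>
    intro a
    simp only [List.foldl_cons]
    rcases ih (max a (c k)) with h | ⟨v, hv, hev⟩
    · rcases max_choice a (c k) with hm | hm
      · exact Or.inl (h.trans hm)
      · exact Or.inr ⟨k, by simp, h.trans hm⟩
    · exact Or.inr ⟨v, by simp [hv], hev⟩

theorem cfold_bounds (c : String → Int) (ks : List String) (a : Int) :
    a ≤ ks.foldl (fun a v => max a (c v)) a ∧ ∀ v ∈ ks, c v ≤ ks.foldl (fun a v => max a (c v)) a := by
  have h := PySem.List.le_foldl_max (ks.map c) a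
  rw [List.foldl_map] at h
  exact ⟨h.1, fun v hv => h.2 (c v) (List.mem_map_of_mem hv)⟩

theorem argfold (c : String → Int) : ∀ (ks : List String) (b : String) (bc : Int),
    ks.foldl (fun acc v => if c v > acc.2 then (v, c v) else acc) (b, bc)
    = (match ks.find? (fun v => decide (bc < c v ∧ c v = ks.foldl (fun a v => max a (c v)) bc)) with
       | some k => (k, ks.foldl (fun a v => max a (c v)) bc)
       | none => (b, bc)) := by
  intro ks
  induction ks with
  | nil => intro b bc; rfl
  | cons k ks ih =>
    intro b bc
    simp only [List.foldl_cons]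
    by_cases hk : c k > bc
    · have hmax : max bc (c k) = c k := by omega
      rw [show (if c k > (b, bc).2 then (k, c k) else (b, bc)) = (k, c k) from if_pos hk]
      simp only [hmax]
      rw [ih k (c k)]
      have hkm : c k ≤ ks.foldl (fun a v => max a (c v)) (c k) := (cfold_bounds c ks (c k)).1
      by_cases he : c k = ks.foldl (fun a v => max a (c v)) (c k)
      · rw [List.find?_cons_of_pos (by simp only [decide_eq_true_eq]; exact ⟨hk, he⟩)]
        rw [List.find?_eq_none.mpr (fun x hx => by
          simp only [decide_eq_true_eq, not_and]
          intro h1 h2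
          omega)]
        rw [← he]
      · have hlt : c k < ks.foldl (fun a v => max a (c v)) (c k) := lt_of_le_of_ne hkm he
        rw [List.find?_cons_of_neg (by simp only [decide_eq_true_eq, not_and]; intro _ h; omega)]
        rw [find?_congr_mem (p := fun v => decide (c k < c v ∧ c v = ks.foldl (fun a v => max a (c v)) (c k)))
          (q := fun v => decide (bc < c v ∧ c v = ks.foldl (fun a v => max a (c v)) (c k))) ks
          (fun x _ => by
            by_cases hxm : c x = ks.foldl (fun a v => max a (c v)) (c k)
            · have h1 : bc < c x := by omega
              have h2 : c k < c x := by omega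
              rw [hxm] at h1 h2
              simp only [hxm, and_true, decide_eq_true h1, decide_eq_true h2]
            · simp [hxm])]
        cases hfind : List.find? (fun v => decide (bc < c v ∧ c v = ks.foldl (fun a v => max a (c v)) (c k))) ks with
        | some k' => rfl
        | none =>
          exfalso
          rcases foldl_max_attained c ks (c k) with h | ⟨v, hv, hev⟩
          · exact he h.symm
          · have hnone := List.find?_eq_none.mp hfind v hv
            simp only [decide_eq_true_eq, not_and] at hnone
            exact hnone (by omega) hev.symm
    · have hmax : max bc (c k) = bc := by omega
      rw [show (if c k > (b, bc).2 then (k, c k) else (b, bc)) = (b, bc) from if_neg hk]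
      simp only [hmax]
      rw [ih b bc]
      rw [List.find?_cons_of_neg (by simp only [decide_eq_true_eq, not_and]; intro h; omega)]

theorem vote_eq (values : List String) : majority_vote values = voteBrute values := by
  by_cases hnil : values = []
  · subst hnil; rfl
  · set D := PySem.Set.ofList values with hD
    set c : String → Int := fun v => (List.count v values : Int) with hc
    have hvmem : ∀ k, k ∈ values → (1 : Int) ≤ c k := by
      intro k hk
      have := List.count_pos_iff.mpr hk
      simp only [hc]
      omega
    set m := values.foldl (fun a v => max a (c v)) 0 with hm
    have hub : ∀ v ∈ values, c v ≤ m := (cfold_bounds c values 0).2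
    have hmub : ∀ k ∈ D, c k ≤ m := fun k hk => hub k ((PySem.Set.mem_ofList values k).mp hk)
    have hDne : D ≠ [] := by
      intro h
      rcases List.exists_mem_of_ne_nil values hnil with ⟨v, hv⟩
      have := (PySem.Set.mem_ofList values v).mpr hv
      rw [← hD] at this
      simp [h] at this
    have hmpos : (1 : Int) ≤ m := by
      rcases List.exists_mem_of_ne_nil values hnil with ⟨v, hv⟩
      have := hub v hv
      have := hvmem v hv
      omega
    have hmatt : ∃ k ∈ D, c k = m := by
      rcases foldl_max_attained c values 0 with h | ⟨v, hv, hev⟩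
      · omega
      · exact ⟨v, (PySem.Set.mem_ofList values v).mpr hv, hev.symm⟩
    -- the first value attaining the max, in values and among distinct values
    obtain ⟨k₀, hk₀⟩ : ∃ k₀, D.find? (fun k => c k == m) = some k₀ := by
      rcases hmatt with ⟨k, hk, hck⟩
      have : (D.find? (fun k => c k == m)).isSome = true :=
        List.find?_isSome.mpr ⟨k, hk, by simp [hck]⟩
      exact Option.isSome_iff_exists.mp this
    have hkv : values.find? (fun k => c k == m) = some k₀ := by
      rw [show values.find? (fun k => c k == m) = D.find? (fun k => c k == m) from by
        rw [hD, ← PySem.List.dedup_eq_ofList, find?_dedup]]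
      exact hk₀
    -- ===== B side =====
    have hB : voteBrute values = k₀ := by
      unfold voteBrute
      have hfun : (fun (b : String × Int) v =>
          let cc : Int := (PySem.List.count values v : Int)
          if cc > b.2 then (v, cc) else b)
          = (fun (b : String × Int) v => if c v > b.2 then (v, c v) else b) := by
        funext b v
        simp [PySem.List.count_eq, hc]
      rw [hfun, argfold c values "is_blank" 0]
      rw [find?_congr_mem (p := fun v => decide (0 < c v ∧ c v = m))
        (q := fun k => c k == m) values (fun v hv => by
          by_cases hcm : c v = m
          · have h1 : (0 : Int) < c v := by have := hvmem v hv; omega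
            simp [hcm]
            omega
          · simp [hcm])]
      rw [hkv]
    -- ===== A side =====
    rw [hB]
    unfold majority_vote
    rw [if_neg hnil]
    simp only [PySem.Dict.items_counter, ← hD]
    obtain ⟨h, t, hst⟩ : ∃ h t, PySem.List.sorted (D.map (fun k => (k, c k))) (fun kv => kv.2) true = h :: t := by
      cases hs : PySem.List.sorted (D.map (fun k => (k, c k))) (fun kv => kv.2) true with
      | nil =>
        exfalso
        have := (PySem.List.sorted_eq_nil_iff _ _ _).mp hs
        exact hDne (List.map_eq_nil_iff.mp this)
      | cons h t => exact ⟨h, t, rfl⟩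
    rw [hst]
    have hhmem : h ∈ D.map (fun k => (k, c k)) := by
      have : h ∈ h :: t := List.mem_cons_self
      rw [← hst] at this
      exact (PySem.List.sorted_perm _ _ _).mem_iff.mp this
    have hubs := PySem.List.key_head_sorted_rev_ge (D.map (fun k => (k, c k))) (fun kv => kv.2) hst
    have hmc : h.2 = m := by
      rcases List.mem_map.mp hhmem with ⟨k, hk, hke⟩
      have h1 : h.2 ≤ m := by rw [← hke]; exact hmub k hk
      rcases hmatt with ⟨k', hk', hck'⟩
      have h2 : c k' ≤ h.2 := hubs (k', c k') (List.mem_map_of_mem hk')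
      omega
    simp only [List.headD, hmc]
    rw [List.filter_map, List.map_map]
    have hcomp : ((fun kv : String × Int => kv.1) ∘ (fun k => (k, c k))) = id := rfl
    rw [hcomp, List.map_id]
    have hpred : ((fun kv : String × Int => kv.2 == m) ∘ (fun k => (k, c k))) = (fun k => c k == m) := rfl
    rw [hpred]
    obtain ⟨tt, htied⟩ : ∃ tt, D.filter (fun k => c k == m) = k₀ :: tt := by
      have := List.head?_filter (p := fun k => c k == m) (l := D)
      rw [hk₀] at this
      cases hf : D.filter (fun k => c k == m) with
      | nil => rw [hf] at this; simp at this
      | cons a b =>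
        rw [hf] at this
        simp only [List.head?_cons, Option.some.injEq] at this
        exact ⟨b, by rw [this]⟩
    rw [htied]
    by_cases hlen : (k₀ :: tt).length = 1
    · rw [if_pos hlen]
    · rw [if_neg hlen]
      have hfv : values.find? (fun v => (k₀ :: tt).contains v) = some k₀ := by
        rw [find?_congr_mem (p := fun v => (k₀ :: tt).contains v) (q := fun k => c k == m) values
          (fun v hv => by
            simp only []
            rw [← htied]
            by_cases hcm : c v = m
            · have hmem : v ∈ D.filter (fun k => c k == m) := by
                rw [List.mem_filter]
                exact ⟨(PySem.Set.mem_ofList values v).mpr hv, by simp [hcm]⟩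
              rw [List.contains_iff_mem.mpr hmem]
              simp [hcm]
            · have hmem : v ∉ D.filter (fun k => c k == m) := by
                rw [List.mem_filter]
                rintro ⟨-, hb⟩
                simp at hb
                exact hcm hb
              have hct : (D.filter (fun k => c k == m)).contains v = false := by
                rw [Bool.eq_false_iff]
                intro hcon
                exact hmem (List.contains_iff_mem.mp hcon)
              rw [hct]
              simp [hcm])]
        exact hkv
      rw [hfv]

theorem agg_eq (rows : List (List (String × String))) :
    aggregate_ref_priority rows = aggregate_ref_priority_alt rows := by
  have hfield : pyRowGet = rowField := by
    funext r key
    unfold pyRowGet rowField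
    by_cases hv : PySem.Dict.getD (PySem.Dict.mk r) key "is_blank" = "" <;> simp [hv]
  by_cases hnil : rows = []
  · subst hnil; rfl
  · unfold aggregate_ref_priority aggregate_ref_priority_alt
    rw [if_neg hnil]
    simp only [hfield, vote_eq]

-- ===== VERDICT (by name: the statement is the Claim_ definition above) =====
theorem aggregate_ref_priority_spec : Claim_equal_aggregate_ref_priority := by
  intro rows _
  unfold Spec_aggregate_ref_priority
  exact agg_eq rows
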